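-- pv_equiv track=rewrite | github.com/dmurphs/skipy | populate_nrcs_monthly.py | get_months_data
-- ===== SOURCE A (Python) =====
-- months = ['Jan','Feb','Mar','Apr','May','Jun','Jul','Aug','Sep','Oct','Nov','Dec']
--
-- def field_prefix(field_name):
--     return field_name.split('_')[0]
--
-- def is_null_or_empty(text):
--     return text == '' or text == None
--
-- def remove_empty_fields(row_dict):
--     return {field: row_dict[field] for field in row_dict if not is_null_or_empty(row_dict[field])}
--
-- def remove_prefix(field_name):
--     components = field_name.split('_')
--     return '_'.join(components[1:])
--
-- def get_months_data(row_dict):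
--     row_data = remove_empty_fields(row_dict)
--     field_prefixes = [field_prefix(field) for field in row_data]
--     included_months = [month for month in months if month in field_prefixes]
--
--     months_data = {}
--
--     for month in included_months:
--         month_num = months.index(month) + 1
--         month_fields = [field for field in row_data if field_prefix(field) == month]
--         month_data = {remove_prefix(field): row_data[field] for field in month_fields}
--         months_data[month_num] = month_data
--
--     return months_data
-- ===== SOURCE B (Python) =====
-- months = ['Jan','Feb','Mar','Apr','May','Jun','Jul','Aug','Sep','Oct','Nov','Dec']
--
-- def get_months_data(row_dict):
--     # One pass: bucket each kept field under its month number, then emit buckets in month order.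
--     month_num = {m: i + 1 for i, m in enumerate(months)}
--     buckets = {}
--     for field, value in row_dict.items():
--         if value == '' or value is None:
--             continue
--         parts = field.split('_')
--         num = month_num.get(parts[0])
--         if num is None:
--             continue
--         buckets.setdefault(num, {})['_'.join(parts[1:])] = value
--     return dict(sorted(buckets.items(), key=lambda item: item[0]))
-- ===== Notes on version B (the rewrite author's own statement) =====
-- stated objective: alternative
-- what changed: A rescans the whole filtered row once per month (12 filter passes plus a membership pass); B makes one pass over the row, bucketing each kept field under its month number via a prefix->number dict, then emits the buckets sorted by month number.
import Mathlib
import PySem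

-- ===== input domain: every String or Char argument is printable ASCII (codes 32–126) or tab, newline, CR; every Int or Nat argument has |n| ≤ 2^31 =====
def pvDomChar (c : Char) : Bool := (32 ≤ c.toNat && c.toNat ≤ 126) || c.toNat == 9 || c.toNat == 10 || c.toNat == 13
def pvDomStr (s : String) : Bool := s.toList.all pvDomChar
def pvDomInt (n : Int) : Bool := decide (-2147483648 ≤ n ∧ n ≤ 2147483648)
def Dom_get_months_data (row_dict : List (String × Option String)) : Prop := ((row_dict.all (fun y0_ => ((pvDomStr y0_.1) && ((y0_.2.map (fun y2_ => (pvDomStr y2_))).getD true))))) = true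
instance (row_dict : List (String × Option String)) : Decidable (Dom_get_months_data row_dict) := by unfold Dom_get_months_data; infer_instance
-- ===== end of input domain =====

-- B buckets each kept field under its month number in ONE pass over the row and then emits the buckets
-- sorted by month number, instead of A's rescan of all fields once per month (objective: alternative).

def pvMonths : List String := ["Jan","Feb","Mar","Apr","May","Jun","Jul","Aug","Sep","Oct","Nov","Dec"]

-- field_prefix: field_name.split('_')[0].  split with a non-empty separator never returns an empty
-- list, so the [0] indexing (which would raise on []) is exactly headD "".
def pvFieldPrefix (f : String) : String := ((PySem.Str.split? f "_").getD []).headD ""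

-- remove_prefix: '_'.join(field_name.split('_')[1:])
def pvRemovePrefix (f : String) : String := PySem.Str.join "_" (((PySem.Str.split? f "_").getD []).drop 1)

-- ===== PORT A =====
def get_months_data (row_dict : List (String × Option String)) : List (Int × List (String × String)) :=
  -- remove_empty_fields: keep fields whose value is neither None nor ''.  The kept pair's own value
  -- stands for row_data[field] (faithful because Pre_ requires unique field names).
  let row_data : List (String × String) := row_dict.filterMap (fun fv =>
    match fv.2 with
    | none => none
    | some v => if v = "" then none else some (fv.1, v))
  let field_prefixes : List String := row_data.map (fun fv => pvFieldPrefix fv.1)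
  let included_months : List String := pvMonths.filter (fun m => field_prefixes.contains m)
  let months_data : PySem.Dict Int (PySem.Dict String String) :=
    included_months.foldl (fun md m =>
      -- months.index(month): month ∈ months here, so index? is some and .getD 0 is exact
      let month_num : Int := (((PySem.List.index? pvMonths m).getD 0 : Nat) : Int) + 1
      let month_fields : List (String × String) := row_data.filter (fun fv => pvFieldPrefix fv.1 == m)
      let month_data : PySem.Dict String String :=
        month_fields.foldl (fun d fv => d.insert (pvRemovePrefix fv.1) fv.2) PySem.Dict.empty
      md.insert month_num month_data) PySem.Dict.empty
  months_data.items.map (fun p => (p.1, p.2.items))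

-- ===== PORT B =====
def get_months_data_alt (row_dict : List (String × Option String)) : List (Int × List (String × String)) :=
  let month_num : PySem.Dict String Int :=
    (PySem.List.enumerate pvMonths).foldl (fun d p => d.insert p.2 (p.1 + 1)) PySem.Dict.empty
  let buckets : PySem.Dict Int (PySem.Dict String String) :=
    row_dict.foldl (fun b fv =>
      match fv.2 with
      | none => b
      | some v =>
        if v = "" then b
        else
          let parts : List String := (PySem.Str.split? fv.1 "_").getD []   -- sep '_' ≠ '', exact
          match month_num.get? (parts.headD "") with                        -- parts[0], parts ≠ []
          | none => b
          | some num =>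
              -- buckets.setdefault(num, {})['_'.join(parts[1:])] = value : Dict.insert overwrites in
              -- place at an existing key and appends a new key, exactly the mutation's effect
              b.insert num ((b.getD num PySem.Dict.empty).insert (PySem.Str.join "_" (parts.drop 1)) v))
      PySem.Dict.empty
  (PySem.List.sorted buckets.items (fun item => item.1) false).map (fun p => (p.1, p.2.items))

-- ===== PRECONDITION & SPEC =====
-- Pre_ excludes association lists with duplicate field names: such a list does not denote a Python
-- dict input (Python collapses duplicates before get_months_data ever runs), so the corner is an
-- artefact of the list encoding; both Pythons see the collapsed dict and agree there.
def pvNodupKeys : List String → Bool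
  | [] => true
  | k :: rest => !(rest.any (fun k' => k' == k)) && pvNodupKeys rest

def Pre_get_months_data (row_dict : List (String × Option String)) : Prop :=
  pvNodupKeys (row_dict.map Prod.fst) = true
instance (row_dict : List (String × Option String)) : Decidable (Pre_get_months_data row_dict) := by
  unfold Pre_get_months_data; infer_instance

def pvWitness_get_months_data : (List (String × Option String)) :=
  [("Jan_precip", some "10"), ("Feb_precip", some "3"), ("note", some "x"), ("Jan_temp", none)]

def Spec_get_months_data (row_dict : List (String × Option String)) (out : List (Int × List (String × String))) : Prop := out = get_months_data_alt row_dict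
instance (row_dict : List (String × Option String)) (out : List (Int × List (String × String))) : Decidable (Spec_get_months_data row_dict out) := by unfold Spec_get_months_data; infer_instance

-- ===== CLAIM (what is proved, stated in full; the proofs are below) =====
def Claim_equal_get_months_data : Prop := ∀ (row_dict : List (String × Option String)), Dom_get_months_data row_dict → Pre_get_months_data row_dict → Spec_get_months_data row_dict (get_months_data row_dict)

-- ===== LEMMAS AND PROOFS =====

-- the filtered row (remove_empty_fields / B's two 'continue's)
def pvKept (row_dict : List (String × Option String)) : List (String × String) :=
  row_dict.filterMap (fun fv => match fv.2 with
    | none => none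
    | some v => if v = "" then none else some (fv.1, v))

def pvNum (m : String) : Int := (((PySem.List.index? pvMonths m).getD 0 : Nat) : Int) + 1

def pvMonthNum : PySem.Dict String Int :=
  (PySem.List.enumerate pvMonths).foldl (fun d p => d.insert p.2 (p.1 + 1)) PySem.Dict.empty

def pvStep (b : PySem.Dict Int (PySem.Dict String String)) (fv : String × String) :
    PySem.Dict Int (PySem.Dict String String) :=
  if pvFieldPrefix fv.1 ∈ pvMonths then
    b.insert (pvNum (pvFieldPrefix fv.1))
      ((b.getD (pvNum (pvFieldPrefix fv.1)) PySem.Dict.empty).insert (pvRemovePrefix fv.1) fv.2)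
  else b

def pvKeys (l : List (String × String)) : List Int :=
  PySem.Set.ofList ((l.filter (fun fv => decide (pvFieldPrefix fv.1 ∈ pvMonths))).map
    (fun fv => pvNum (pvFieldPrefix fv.1)))

def pvInner (l : List (String × String)) (n : Int) : PySem.Dict String String :=
  (l.filter (fun fv => decide (pvFieldPrefix fv.1 ∈ pvMonths) && pvNum (pvFieldPrefix fv.1) == n)).foldl
    (fun d fv => d.insert (pvRemovePrefix fv.1) fv.2) PySem.Dict.empty

lemma pvMonthNum_eq : pvMonthNum = PySem.Dict.mk
    [("Jan",1),("Feb",2),("Mar",3),("Apr",4),("May",5),("Jun",6),("Jul",7),("Aug",8),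
     ("Sep",9),("Oct",10),("Nov",11),("Dec",12)] := by decide

lemma pvNum_inj : ∀ a ∈ pvMonths, ∀ b ∈ pvMonths, pvNum a = pvNum b → a = b := by decide

lemma lookup_pvMonthNum (p : String) :
    pvMonthNum.get? p = if p ∈ pvMonths then some (pvNum p) else none := by
  rw [pvMonthNum_eq]
  by_cases h1 : p = "Jan"
  · subst h1; decide
  by_cases h2 : p = "Feb"
  · subst h2; decide
  by_cases h3 : p = "Mar"
  · subst h3; decide
  by_cases h4 : p = "Apr"
  · subst h4; decide
  by_cases h5 : p = "May"
  · subst h5; decide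
  by_cases h6 : p = "Jun"
  · subst h6; decide
  by_cases h7 : p = "Jul"
  · subst h7; decide
  by_cases h8 : p = "Aug"
  · subst h8; decide
  by_cases h9 : p = "Sep"
  · subst h9; decide
  by_cases h10 : p = "Oct"
  · subst h10; decide
  by_cases h11 : p = "Nov"
  · subst h11; decide
  by_cases h12 : p = "Dec"
  · subst h12; decide
  have hnm : p ∉ pvMonths := by
    simp only [pvMonths, List.mem_cons, List.not_mem_nil, or_false]
    push Not
    exact ⟨h1, h2, h3, h4, h5, h6, h7, h8, h9, h10, h11, h12⟩
  rw [if_neg hnm]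
  simp only [PySem.Dict.get?_mk_cons, beq_iff_eq]
  rw [if_neg (fun h => h1 h.symm), if_neg (fun h => h2 h.symm), if_neg (fun h => h3 h.symm), if_neg (fun h => h4 h.symm), if_neg (fun h => h5 h.symm), if_neg (fun h => h6 h.symm), if_neg (fun h => h7 h.symm), if_neg (fun h => h8 h.symm), if_neg (fun h => h9 h.symm), if_neg (fun h => h10 h.symm), if_neg (fun h => h11 h.symm), if_neg (fun h => h12 h.symm)]
  rfl

def pvBodyB (b : PySem.Dict Int (PySem.Dict String String)) (fv : String × Option String) :
    PySem.Dict Int (PySem.Dict String String) :=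
  match fv.2 with
  | none => b
  | some v =>
    if v = "" then b
    else
      let parts : List String := (PySem.Str.split? fv.1 "_").getD []
      match pvMonthNum.get? (parts.headD "") with
      | none => b
      | some num =>
          b.insert num ((b.getD num PySem.Dict.empty).insert (PySem.Str.join "_" (parts.drop 1)) v)

lemma foldl_fusion (l : List (String × Option String)) (b : PySem.Dict Int (PySem.Dict String String)) :
    l.foldl pvBodyB b = (pvKept l).foldl pvStep b := by
  induction l generalizing b with
  | nil => rfl
  | cons x l ih =>
    obtain ⟨f, v?⟩ := x
    match v? with
    | none =>
      show (l.foldl pvBodyB (pvBodyB b (f, none))) = (pvKept ((f, none) :: l)).foldl pvStep b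
      have h1 : pvBodyB b (f, none) = b := rfl
      have h2 : pvKept ((f, none) :: l) = pvKept l := by simp [pvKept]
      rw [h1, h2]; exact ih b
    | some v =>
      by_cases hv : v = ""
      · subst hv
        show (l.foldl pvBodyB (pvBodyB b (f, some ""))) = (pvKept ((f, some "") :: l)).foldl pvStep b
        have h1 : pvBodyB b (f, some "") = b := rfl
        have h2 : pvKept ((f, some "") :: l) = pvKept l := by simp [pvKept]
        rw [h1, h2]; exact ih b
      · show (l.foldl pvBodyB (pvBodyB b (f, some v))) = (pvKept ((f, some v) :: l)).foldl pvStep b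
        have h2 : pvKept ((f, some v) :: l) = (f, v) :: pvKept l := by simp [pvKept, hv]
        have h1 : pvBodyB b (f, some v) = pvStep b (f, v) := by
          show (if v = "" then b
                else
                  match pvMonthNum.get? (((PySem.Str.split? f "_").getD []).headD "") with
                  | none => b
                  | some num =>
                      b.insert num ((b.getD num PySem.Dict.empty).insert
                        (PySem.Str.join "_" (((PySem.Str.split? f "_").getD []).drop 1)) v)) = pvStep b (f, v)
          rw [if_neg hv]
          rw [show (((PySem.Str.split? f "_").getD []).headD "") = pvFieldPrefix f from rfl]
          rw [lookup_pvMonthNum]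
          by_cases hm : pvFieldPrefix f ∈ pvMonths
          · rw [if_pos hm]; unfold pvStep; rw [if_pos hm]; rfl
          · rw [if_neg hm]; unfold pvStep; rw [if_neg hm]
        rw [h2, List.foldl_cons, h1]
        exact ih _

lemma pvInner_not_mem {l : List (String × String)} {n : Int} (h : n ∉ pvKeys l) :
    pvInner l n = PySem.Dict.empty := by
  unfold pvInner
  have hnil : l.filter (fun fv => decide (pvFieldPrefix fv.1 ∈ pvMonths) && pvNum (pvFieldPrefix fv.1) == n) = [] := by
    rw [List.filter_eq_nil_iff]
    intro fv hfv hb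
    simp only [Bool.and_eq_true, decide_eq_true_eq, beq_iff_eq] at hb
    exact h (by
      unfold pvKeys
      rw [PySem.Set.mem_ofList]
      exact List.mem_map.mpr ⟨fv, List.mem_filter.mpr ⟨hfv, by simp [hb.1]⟩, hb.2⟩)
  rw [hnil]
  rfl

lemma pvKeys_append_not {x : String × String} (hm : pvFieldPrefix x.1 ∉ pvMonths)
    (l : List (String × String)) : pvKeys (l ++ [x]) = pvKeys l := by
  unfold pvKeys
  rw [List.filter_append]
  have : [x].filter (fun fv => decide (pvFieldPrefix fv.1 ∈ pvMonths)) = [] := by simp [hm]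
  rw [this, List.append_nil]

lemma pvKeys_append_yes {x : String × String} (hm : pvFieldPrefix x.1 ∈ pvMonths)
    (l : List (String × String)) :
    pvKeys (l ++ [x]) = PySem.Set.add (pvKeys l) (pvNum (pvFieldPrefix x.1)) := by
  unfold pvKeys
  rw [List.filter_append]
  have : [x].filter (fun fv => decide (pvFieldPrefix fv.1 ∈ pvMonths)) = [x] := by simp [hm]
  rw [this, List.map_append]
  exact PySem.Set.ofList_append_singleton ..

lemma pvInner_append_not {x : String × String} (hm : pvFieldPrefix x.1 ∉ pvMonths)
    (l : List (String × String)) (n : Int) : pvInner (l ++ [x]) n = pvInner l n := by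
  unfold pvInner
  rw [List.filter_append]
  have : [x].filter (fun fv => decide (pvFieldPrefix fv.1 ∈ pvMonths) && pvNum (pvFieldPrefix fv.1) == n) = [] := by
    simp [hm]
  rw [this, List.append_nil]

lemma pvInner_append_ne {x : String × String} {n : Int} (h : pvNum (pvFieldPrefix x.1) ≠ n)
    (l : List (String × String)) : pvInner (l ++ [x]) n = pvInner l n := by
  unfold pvInner
  rw [List.filter_append]
  have : [x].filter (fun fv => decide (pvFieldPrefix fv.1 ∈ pvMonths) && pvNum (pvFieldPrefix fv.1) == n) = [] := by
    simp [h]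
  rw [this, List.append_nil]

lemma pvInner_append_self {x : String × String} (hm : pvFieldPrefix x.1 ∈ pvMonths)
    (l : List (String × String)) :
    pvInner (l ++ [x]) (pvNum (pvFieldPrefix x.1))
      = (pvInner l (pvNum (pvFieldPrefix x.1))).insert (pvRemovePrefix x.1) x.2 := by
  unfold pvInner
  rw [List.filter_append]
  have : [x].filter (fun fv => decide (pvFieldPrefix fv.1 ∈ pvMonths) && pvNum (pvFieldPrefix fv.1) == pvNum (pvFieldPrefix x.1)) = [x] := by
    simp [hm]
  rw [this, List.foldl_append, List.foldl_cons, List.foldl_nil]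

lemma keys_mkKeys (l : List (String × String)) :
    (PySem.Dict.mk ((pvKeys l).map (fun n => (n, pvInner l n)))).keys = pvKeys l := by
  simp only [PySem.Dict.keys_mk, List.map_map]
  exact List.map_id _

lemma nodup_mkKeys (l : List (String × String)) :
    (PySem.Dict.mk ((pvKeys l).map (fun n => (n, pvInner l n)))).keys.Nodup := by
  rw [keys_mkKeys]
  exact PySem.Set.nodup_ofList _

lemma foldl_pvStep_eq (l : List (String × String)) :
    l.foldl pvStep PySem.Dict.empty
      = PySem.Dict.mk ((pvKeys l).map (fun n => (n, pvInner l n))) := by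
  induction l using List.reverseRecOn with
  | nil => rfl
  | append_singleton l x ih =>
    rw [List.foldl_append, List.foldl_cons, List.foldl_nil, ih]
    unfold pvStep
    by_cases hm : pvFieldPrefix x.1 ∈ pvMonths
    · rw [if_pos hm]
      set n := pvNum (pvFieldPrefix x.1) with hn
      by_cases hk : n ∈ pvKeys l
      · have hadd : PySem.Set.add (pvKeys l) n = pvKeys l := by
          simp [PySem.Set.add, hk]
        have hcont : (PySem.Dict.mk ((pvKeys l).map (fun n => (n, pvInner l n)))).contains n = true := by
          rw [PySem.Dict.contains_eq_decide_mem_keys, keys_mkKeys]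
          simpa using hk
        have hgetD : (PySem.Dict.mk ((pvKeys l).map (fun n => (n, pvInner l n)))).getD n PySem.Dict.empty
            = pvInner l n :=
          PySem.Dict.getD_of_mem_items (PySem.Dict.mk ((pvKeys l).map (fun n => (n, pvInner l n))))
            ((List.mem_map (f := fun n => (n, pvInner l n))).mpr ⟨n, hk, rfl⟩) (nodup_mkKeys l) PySem.Dict.empty
        apply PySem.Dict.ext
        rw [PySem.Dict.items_insert_of_contains _ _ hcont, hgetD]
        show ((pvKeys l).map (fun n' => (n', pvInner l n'))).map
              (fun p => if p.1 == n then (n, (pvInner l n).insert (pvRemovePrefix x.1) x.2) else p)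
            = (pvKeys (l ++ [x])).map (fun n' => (n', pvInner (l ++ [x]) n'))
        rw [pvKeys_append_yes hm, ← hn, hadd, List.map_map]
        apply List.map_congr_left
        intro n' _
        by_cases he : n' = n
        · subst he
          simp only [Function.comp_apply, beq_self_eq_true, if_pos]
          rw [hn, pvInner_append_self hm]
        · have : (n' == n) = false := by simp [he]
          simp only [Function.comp_apply, this, Bool.false_eq_true, if_false]
          rw [pvInner_append_ne (by rw [← hn]; exact fun h => he h.symm)]
      · have hadd : PySem.Set.add (pvKeys l) n = pvKeys l ++ [n] := by
          simp [PySem.Set.add, hk]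
        have hcont : (PySem.Dict.mk ((pvKeys l).map (fun n => (n, pvInner l n)))).contains n = false := by
          rw [PySem.Dict.contains_eq_decide_mem_keys, keys_mkKeys]
          simpa using hk
        have hgetD : (PySem.Dict.mk ((pvKeys l).map (fun n => (n, pvInner l n)))).getD n PySem.Dict.empty
            = PySem.Dict.empty := PySem.Dict.getD_of_not_contains _ PySem.Dict.empty hcont
        apply PySem.Dict.ext
        rw [PySem.Dict.items_insert_of_not_contains _ _ hcont, hgetD]
        show ((pvKeys l).map (fun n' => (n', pvInner l n'))) ++ [(n, PySem.Dict.empty.insert (pvRemovePrefix x.1) x.2)]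
            = (pvKeys (l ++ [x])).map (fun n' => (n', pvInner (l ++ [x]) n'))
        rw [pvKeys_append_yes hm, ← hn, hadd, List.map_append]
        congr 1
        · apply List.map_congr_left
          intro n' hn'
          have hne : n' ≠ n := fun he => hk (he ▸ hn')
          rw [pvInner_append_ne (by rw [← hn]; exact fun h => hne h.symm)]
        · rw [List.map_singleton, hn, pvInner_append_self hm, pvInner_not_mem (hn ▸ hk)]
    · rw [if_neg hm]
      rw [pvKeys_append_not hm]
      congr 1
      apply List.map_congr_left
      intro n' _
      rw [pvInner_append_not hm]

lemma pvNum_pairwise : pvMonths.Pairwise (fun a b => pvNum a < pvNum b) := by decide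

lemma innerA_eq (l : List (String × String)) {m : String} (hm : m ∈ pvMonths) :
    (l.filter (fun fv => pvFieldPrefix fv.1 == m)).foldl
        (fun d fv => d.insert (pvRemovePrefix fv.1) fv.2) PySem.Dict.empty
      = pvInner l (pvNum m) := by
  unfold pvInner
  congr 1
  apply List.filter_congr
  intro fv _
  by_cases h : pvFieldPrefix fv.1 = m
  · simp [h, hm]
  · have h1 : (pvFieldPrefix fv.1 == m) = false := by simp [h]
    rw [h1]
    by_cases hmem : pvFieldPrefix fv.1 ∈ pvMonths
    · have h2 : (pvNum (pvFieldPrefix fv.1) == pvNum m) = false := by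
        simp only [beq_eq_false_iff_ne, ne_eq]
        exact fun he => h (pvNum_inj _ hmem _ hm he)
      rw [h2, Bool.and_false]
    · have h2 : decide (pvFieldPrefix fv.1 ∈ pvMonths) = false := by simp [hmem]
      rw [h2, Bool.false_and]

theorem get_months_data_spec : Claim_equal_get_months_data := by
  intro row _ _
  unfold Spec_get_months_data
  have hB : get_months_data_alt row
      = (PySem.List.sorted ((row.foldl pvBodyB PySem.Dict.empty).items) (fun item => item.1) false).map
          (fun p => (p.1, p.2.items)) := rfl
  have hA : get_months_data row
      = ((pvMonths.filter (fun m => ((pvKept row).map (fun fv => pvFieldPrefix fv.1)).contains m)).foldl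
            (fun md m =>
              md.insert ((((PySem.List.index? pvMonths m).getD 0 : Nat) : Int) + 1)
                (((pvKept row).filter (fun fv => pvFieldPrefix fv.1 == m)).foldl
                  (fun d fv => d.insert (pvRemovePrefix fv.1) fv.2) PySem.Dict.empty))
            PySem.Dict.empty).items.map (fun p => (p.1, p.2.items)) := rfl
  rw [hA, hB, foldl_fusion, foldl_pvStep_eq]
  set q : String → Bool := fun m => ((pvKept row).map (fun fv => pvFieldPrefix fv.1)).contains m with hq
  set kept := pvKept row with hkept
  -- A's outer dict loop inserts fresh, strictly fresh keys: its items are the mapped list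
  have hnodupnum : ((pvMonths.filter q).map pvNum).Nodup := by
    have hsub : ((pvMonths.filter q).map pvNum).Sublist (pvMonths.map pvNum) :=
      List.filter_sublist.map pvNum
    exact (by decide : (pvMonths.map pvNum).Nodup).sublist hsub
  have hAitems : ((pvMonths.filter q).foldl
      (fun md m =>
        md.insert ((((PySem.List.index? pvMonths m).getD 0 : Nat) : Int) + 1)
          ((kept.filter (fun fv => pvFieldPrefix fv.1 == m)).foldl
            (fun d fv => d.insert (pvRemovePrefix fv.1) fv.2) PySem.Dict.empty))
      PySem.Dict.empty).items
      = (pvMonths.filter q).map (fun m => (pvNum m,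
          (kept.filter (fun fv => pvFieldPrefix fv.1 == m)).foldl
            (fun d fv => d.insert (pvRemovePrefix fv.1) fv.2) PySem.Dict.empty)) := by
    have := PySem.Dict.items_foldl_insert_fresh (d := (PySem.Dict.empty : PySem.Dict Int (PySem.Dict String String)))
      (l := pvMonths.filter q) (k := pvNum)
      (v := fun m => (kept.filter (fun fv => pvFieldPrefix fv.1 == m)).foldl
            (fun d fv => d.insert (pvRemovePrefix fv.1) fv.2) PySem.Dict.empty)
      (fun a _ => PySem.Dict.contains_empty ..) hnodupnum
    simpa [pvNum] using this
  -- the intended final arrangement of B's buckets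
  have hys : ((pvMonths.filter q).map (fun m => (pvNum m,
        (kept.filter (fun fv => pvFieldPrefix fv.1 == m)).foldl
          (fun d fv => d.insert (pvRemovePrefix fv.1) fv.2) PySem.Dict.empty)))
      = (pvMonths.filter q).map (fun m => (pvNum m, pvInner kept (pvNum m))) := by
    apply List.map_congr_left
    intro m hmq
    have hm : m ∈ pvMonths := (List.mem_filter.mp hmq).1
    rw [innerA_eq kept hm]
  have hperm : ((pvMonths.filter q).map (fun m => (pvNum m, pvInner kept (pvNum m)))).Perm
      ((pvKeys kept).map (fun n => (n, pvInner kept n))) := by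
    have hkeyperm : ((pvMonths.filter q).map pvNum).Perm (pvKeys kept) := by
      rw [List.perm_ext_iff_of_nodup hnodupnum (show (pvKeys kept).Nodup from PySem.Set.nodup_ofList _)]
      intro n
      constructor
      · intro hn
        obtain ⟨m, hmf, rfl⟩ := List.mem_map.mp hn
        obtain ⟨hmm, hmq⟩ := List.mem_filter.mp hmf
        have hmem' : m ∈ (pvKept row).map (fun fv => pvFieldPrefix fv.1) := by
          rw [hq] at hmq
          simp only [List.contains_iff_mem] at hmq
          exact hmq
        obtain ⟨fv, hfv, hpre⟩ := List.mem_map.mp hmem'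
        unfold pvKeys
        rw [PySem.Set.mem_ofList]
        exact List.mem_map.mpr ⟨fv, List.mem_filter.mpr ⟨hfv, by simp [hpre, hmm]⟩, by rw [hpre]⟩
      · intro hn
        unfold pvKeys at hn
        rw [PySem.Set.mem_ofList] at hn
        obtain ⟨fv, hfvf, rfl⟩ := List.mem_map.mp hn
        obtain ⟨hfv, hmm⟩ := List.mem_filter.mp hfvf
        simp only [decide_eq_true_eq] at hmm
        refine List.mem_map.mpr ⟨pvFieldPrefix fv.1, List.mem_filter.mpr ⟨hmm, ?_⟩, rfl⟩
        rw [hq]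
        simp only [List.contains_iff_mem]
        exact List.mem_map.mpr ⟨fv, hfv, rfl⟩
    have := hkeyperm.map (fun n => (n, pvInner kept n))
    rw [List.map_map] at this
    exact this
  have hpair : ((pvMonths.filter q).map (fun m => (pvNum m, pvInner kept (pvNum m)))).Pairwise
      (fun a b => a.1 < b.1) := by
    rw [List.pairwise_map]
    exact (pvNum_pairwise.sublist List.filter_sublist).imp (fun h => h)
  rw [show (PySem.Dict.mk ((pvKeys kept).map (fun n => (n, pvInner kept n)))).items
        = (pvKeys kept).map (fun n => (n, pvInner kept n)) from rfl]
  rw [PySem.List.sorted_eq_of_perm_of_pairwise_lt _ _ _ hperm hpair]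
  rw [hAitems, hys]
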